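-- pv_equiv track=rewrite | github.com/fanjiamin1/cryptocurrencies | secrets/secretsharing.py | divmod
-- ===== SOURCE A (Python) =====
-- def divmod(a,b,p):
--     #Division in the module P
--     #adapted from wikipedia psuedocode
--     s=0
--     s_prev=1
--     t=1
--     t_prev=0
--     r=b
--     r_prev=p
--     while r!=0:
--         quotient=r_prev//r
--         r_prev,r=r,r_prev - quotient*r
--         s_prev,s=s,s_prev - quotient*s
--         t_prev,t=t,t_prev - quotient*t
--     #either s_prev or t_prev is the inverse of b
--     #return a*s_prev or return a*t_prev
--     return a*t_prev
-- ===== SOURCE B (Python) =====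
-- def divmod(a, b, p):
--     # Division in the modulus p via a recursive extended Euclid.
--     # egcd(x, y) returns (g, s, t) with s*x + t*y == g.
--     def egcd(x, y):
--         if y == 0:
--             return (x, 1, 0)
--         q = x // y
--         g, s, t = egcd(y, x - q * y)
--         return (g, t, s - q * t)
--     return a * egcd(p, b)[2]
-- ===== Notes on version B (the rewrite author's own statement) =====
-- stated objective: alternative
-- what changed: Replaces the iterative six-variable extended-Euclid loop by a recursive egcd helper that computes the Bezout coefficients on the way back up the recursion, then returns a times the coefficient of b.
import Mathlib
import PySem

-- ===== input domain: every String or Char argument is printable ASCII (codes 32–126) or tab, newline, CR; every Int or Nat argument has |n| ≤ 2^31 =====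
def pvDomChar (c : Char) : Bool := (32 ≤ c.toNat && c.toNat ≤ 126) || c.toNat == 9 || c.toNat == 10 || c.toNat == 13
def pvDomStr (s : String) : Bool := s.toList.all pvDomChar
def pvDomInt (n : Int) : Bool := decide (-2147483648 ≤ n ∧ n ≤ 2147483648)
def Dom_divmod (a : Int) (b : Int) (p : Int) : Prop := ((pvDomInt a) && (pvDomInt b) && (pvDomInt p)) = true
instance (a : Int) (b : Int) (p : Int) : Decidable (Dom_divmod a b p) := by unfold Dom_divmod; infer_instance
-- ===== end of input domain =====

-- B rewrites A's iterative six-variable extended-Euclid loop as a recursive egcd helper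
-- computing the Bezout coefficients on the way back up (objective: alternative decomposition).
-- Both ports take a Nat fuel (|b| + 1 iterations always suffice, proved in fuel lemmas below);
-- the fuel only makes the recursion structural, it never changes the computed value.

-- ===== PORT A =====
-- the while loop of A, state (s, s_prev, t, t_prev, r, r_prev); returns the final t_prev
def divmodLoop : Nat → Int → Int → Int → Int → Int → Int → Int
  | 0, _, _, _, t_prev, _, _ => t_prev
  | n + 1, s, s_prev, t, t_prev, r, r_prev =>
    if r = 0 then t_prev
    else
      let quotient := PySem.Int.floordiv r_prev r
      divmodLoop n (s_prev - quotient * s) s (t_prev - quotient * t) t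
        (r_prev - quotient * r) r

def divmod (a : Int) (b : Int) (p : Int) : Int :=
  a * divmodLoop (b.natAbs + 1) 0 1 1 0 b p

-- ===== PORT B =====
-- egcd x y = (g, s, t) with s*x + t*y = g
def egcd : Nat → Int → Int → Int × Int × Int
  | 0, x, _ => (x, 1, 0)
  | n + 1, x, y =>
    if y = 0 then (x, 1, 0)
    else
      let q := PySem.Int.floordiv x y
      let e := egcd n y (x - q * y)
      (e.1, e.2.2, e.2.1 - q * e.2.2)

def divmod_alt (a : Int) (b : Int) (p : Int) : Int :=
  a * (egcd (b.natAbs + 1) p b).2.2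

-- ===== PRECONDITION & SPEC =====
def Spec_divmod (a : Int) (b : Int) (p : Int) (out : Int) : Prop := out = divmod_alt a b p
instance (a : Int) (b : Int) (p : Int) (out : Int) : Decidable (Spec_divmod a b p out) := by unfold Spec_divmod; infer_instance

-- ===== CLAIM (what is proved, stated in full; the proofs are below) =====
def Claim_equal_divmod : Prop := ∀ (a : Int) (b : Int) (p : Int), Dom_divmod a b p → Spec_divmod a b p (divmod a b p)

-- ===== LEMMAS AND PROOFS =====

-- the Euclidean remainder shrinks in absolute value, so the fuel |b| + 1 suffices
theorem pvRem_natAbs_lt (a b : Int) (hb : b ≠ 0) :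
    (a - PySem.Int.floordiv a b * b).natAbs < b.natAbs := by
  have h := PySem.Int.floordiv_mul_add_mod a b
  rcases lt_or_gt_of_ne hb with hneg | hpos
  · have := PySem.Int.mod_neg_bounds a hneg
    omega
  · have h1 := PySem.Int.mod_nonneg a hpos
    have h2 := PySem.Int.mod_lt a hpos
    omega

-- invariant: A's loop result is the Bezout combination of its two t-coefficients,
-- for any sufficient fuels on either side
theorem loop_egcd (n : Nat) : ∀ (m : Nat) (r r_prev s s_prev t t_prev : Int),
    r.natAbs < n → r.natAbs < m →
    divmodLoop n s s_prev t t_prev r r_prev =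
      (egcd m r_prev r).2.1 * t_prev + (egcd m r_prev r).2.2 * t := by
  induction n with
  | zero => intro m r _ _ _ _ _ hn _; omega
  | succ n ih =>
    intro m r r_prev s s_prev t t_prev hn hm
    obtain ⟨m', rfl⟩ : ∃ m', m = m' + 1 := ⟨m - 1, by omega⟩
    by_cases hr : r = 0
    · subst hr
      simp [divmodLoop, egcd]
    · have hlt := pvRem_natAbs_lt r_prev r hr
      simp only [divmodLoop, egcd, hr, if_false]
      rw [ih m' _ _ _ _ _ _ (by omega) (by omega)]
      ring

theorem divmod_spec_aux (a b p : Int) : divmod a b p = divmod_alt a b p := by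
  unfold divmod divmod_alt
  rw [loop_egcd (b.natAbs + 1) (b.natAbs + 1) b p 0 1 1 0 (by omega) (by omega)]
  ring

-- ===== VERDICT (by name: the statement is the Claim_ definition above) =====
theorem divmod_spec : Claim_equal_divmod := by
  intro a b p _
  exact divmod_spec_aux a b p
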